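-- pv_equiv track=rewrite | github.com/piotrhelm/NESTFUL | data_v2/executable_functions/py_code_file_78.py | retrieve_cyclic_elements
-- ===== SOURCE A (Python) =====
-- from typing import List
--
-- def retrieve_cyclic_elements(ls: List[int], limit: int) -> List[int]:
--
--     """Retrieves elements from a list in a cyclic order.
--
--
--
--     Args:
--
--         ls: The list of numbers.
--
--         limit: The number of elements to retrieve.
--
--
--
--     Returns:
--
--         A list of elements retrieved from `ls` in a cyclic order.
--
--     """
--
--     if not ls:
--
--         return []
--
--
--
--     cyclic_elements = []
--
--     index = 0
--
--
--
--     while len(cyclic_elements) < limit: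
--
--         cyclic_elements.append(ls[index])
--
--         index = (index + 1) % len(ls)
--
--
--
--     return cyclic_elements
-- ===== SOURCE B (Python) =====
-- from typing import List
--
-- def retrieve_cyclic_elements(ls: List[int], limit: int) -> List[int]:
--     if not ls or limit <= 0:
--         return []
--     q, r = divmod(limit, len(ls))
--     return ls * q + ls[:r]
-- ===== Notes on version B (the rewrite author's own statement) =====
-- stated objective: faster
-- what changed: Replaces the per-element while loop with modular index tracking by block construction: q,r = divmod(limit, len(ls)) then ls*q + ls[:r].
import Mathlib
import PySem

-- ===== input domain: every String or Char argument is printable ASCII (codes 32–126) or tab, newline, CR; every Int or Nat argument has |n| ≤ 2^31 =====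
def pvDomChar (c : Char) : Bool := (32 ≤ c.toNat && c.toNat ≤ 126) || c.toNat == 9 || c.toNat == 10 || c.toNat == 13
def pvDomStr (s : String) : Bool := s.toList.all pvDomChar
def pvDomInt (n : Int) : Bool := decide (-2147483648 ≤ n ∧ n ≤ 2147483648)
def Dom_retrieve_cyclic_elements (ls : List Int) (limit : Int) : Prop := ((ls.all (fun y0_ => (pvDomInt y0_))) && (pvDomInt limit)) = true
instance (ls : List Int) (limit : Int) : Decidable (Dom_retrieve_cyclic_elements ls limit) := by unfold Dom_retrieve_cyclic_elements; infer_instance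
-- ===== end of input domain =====

-- B replaces A's per-element while loop (modular index) by block construction: ls * (limit // len) + ls[:limit % len].

-- ===== PORT A =====
-- the while loop: append ls[index], advance index cyclically, until len(cyclic_elements) >= limit.
-- ls.getD index 0 is exact for A: index is always 0 ≤ index < ls.length when the loop body runs (ls nonempty).
def pyLoopA (ls : List Int) (limit : Int) (acc : List Int) (index : Nat) : List Int :=
  if (acc.length : Int) < limit then
    pyLoopA ls limit (acc ++ [ls.getD index 0]) ((index + 1) % ls.length)
  else acc
termination_by (limit - acc.length).toNat
decreasing_by simp only [List.length_append, List.length_cons, List.length_nil]; omega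

def retrieve_cyclic_elements (ls : List Int) (limit : Int) : List Int :=
  if ls = [] then [] else pyLoopA ls limit [] 0

-- ===== PORT B =====
-- 'ls * q' with q ≥ 0 is List.replicate q.toNat ls flattened; 'ls[:r]' is PySem.List.slice ls none (some r).
def retrieve_cyclic_elements_alt (ls : List Int) (limit : Int) : List Int :=
  if ls = [] ∨ limit ≤ 0 then []
  else
    (List.replicate (PySem.Int.floordiv limit ls.length).toNat ls).flatten ++
      PySem.List.slice ls none (some (PySem.Int.mod limit ls.length))

-- ===== PRECONDITION & SPEC =====
def Spec_retrieve_cyclic_elements (ls : List Int) (limit : Int) (out : List Int) : Prop := out = retrieve_cyclic_elements_alt ls limit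
instance (ls : List Int) (limit : Int) (out : List Int) : Decidable (Spec_retrieve_cyclic_elements ls limit out) := by unfold Spec_retrieve_cyclic_elements; infer_instance

-- ===== CLAIM (what is proved, stated in full; the proofs are below) =====
def Claim_equal_retrieve_cyclic_elements : Prop := ∀ (ls : List Int) (limit : Int), Dom_retrieve_cyclic_elements ls limit → Spec_retrieve_cyclic_elements ls limit (retrieve_cyclic_elements ls limit)

-- ===== LEMMAS AND PROOFS =====

-- proof-side characterisation: n cyclic elements of ls starting at index i
def cyc (ls : List Int) (i : Nat) : Nat → List Int
  | 0 => []
  | n + 1 => ls.getD i 0 :: cyc ls ((i + 1) % ls.length) n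

theorem pyLoopA_eq_cyc (ls : List Int) (limit : Int) :
    ∀ (n : Nat) (acc : List Int) (i : Nat), (limit - acc.length).toNat = n →
      pyLoopA ls limit acc i = acc ++ cyc ls i n := by
  intro n
  induction n with
  | zero =>
    intro acc i h
    rw [pyLoopA, if_neg (by omega)]
    simp [cyc]
  | succ n ih =>
    intro acc i h
    rw [pyLoopA, if_pos (by omega)]
    rw [ih (acc ++ [ls.getD i 0]) ((i + 1) % ls.length) (by simp; omega)]
    simp [cyc]

theorem cyc_eq_map (ls : List Int) (hls : 0 < ls.length) :
    ∀ (n : Nat) (i : Nat), i < ls.length →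
      cyc ls i n = (List.range n).map (fun k => ls.getD ((i + k) % ls.length) 0) := by
  intro n
  induction n with
  | zero => intro i _; simp [cyc]
  | succ n ih =>
    intro i hi
    rw [cyc, List.range_succ_eq_map, List.map_cons, List.map_map,
        ih ((i + 1) % ls.length) (Nat.mod_lt _ hls)]
    congr 1
    · simp [Nat.mod_eq_of_lt hi]
    · apply List.map_congr_left
      intro k _
      simp only [Function.comp_apply]
      rw [Nat.mod_add_mod]
      congr 2
      omega

theorem map_range_getD (ls : List Int) (r : Nat) (hr : r ≤ ls.length) :
    (List.range r).map (fun k => ls.getD (k % ls.length) 0) = ls.take r := by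
  apply List.ext_getElem
  · simp; omega
  · intro k h1 h2
    simp only [List.getElem_map, List.getElem_range, List.getElem_take]
    have hk : k < ls.length := by simp at h1; omega
    rw [Nat.mod_eq_of_lt hk, List.getD_eq_getElem ls 0 hk]

theorem blocks_eq_map (ls : List Int) :
    ∀ (q r : Nat), r < ls.length →
      (List.replicate q ls).flatten ++ ls.take r
        = (List.range (q * ls.length + r)).map (fun k => ls.getD (k % ls.length) 0) := by
  intro q
  induction q with
  | zero =>
    intro r hr
    simp only [List.replicate, List.flatten_nil, List.nil_append, Nat.zero_mul, Nat.zero_add]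
    rw [map_range_getD ls r (le_of_lt hr)]
  | succ q ih =>
    intro r hr
    have harith : (q + 1) * ls.length + r = ls.length + (q * ls.length + r) := by ring
    rw [harith, List.range_add, List.map_append, List.map_map]
    have h1 : (List.range ls.length).map (fun k => ls.getD (k % ls.length) 0) = ls := by
      rw [map_range_getD ls ls.length le_rfl, List.take_length]
    have h2 : (List.range (q * ls.length + r)).map
        ((fun k => ls.getD (k % ls.length) 0) ∘ (ls.length + ·))
        = (List.range (q * ls.length + r)).map (fun k => ls.getD (k % ls.length) 0) := by
      apply List.map_congr_left
      intro k _
      simp [Function.comp, Nat.add_mod_left]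
    rw [h1, h2, ← ih r hr, List.replicate_succ, List.flatten_cons, List.append_assoc]

-- ===== VERDICT (by name: the statement is the Claim_ definition above) =====
theorem retrieve_cyclic_elements_spec : Claim_equal_retrieve_cyclic_elements := by
  intro ls limit _
  unfold Spec_retrieve_cyclic_elements retrieve_cyclic_elements retrieve_cyclic_elements_alt
  by_cases hnil : ls = []
  · simp [hnil]
  · rw [if_neg hnil]
    have hls : 0 < ls.length := List.length_pos_iff.mpr hnil
    by_cases hlim : limit ≤ 0
    · rw [if_pos (Or.inr hlim), pyLoopA, if_neg (by simp; omega)]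
    · rw [if_neg (by simp [hnil]; omega)]
      push_neg at hlim
      have hlen : (0 : Int) < (ls.length : Int) := by exact_mod_cast hls
      set q := PySem.Int.floordiv limit ls.length with hq
      set r := PySem.Int.mod limit ls.length with hrdef
      have hqe : q = limit / (ls.length : Int) := by
        rw [hq, PySem.Int.floordiv_eq_ediv_of_pos hlen]
      have hre : r = limit % (ls.length : Int) := by
        rw [hrdef, PySem.Int.mod_eq_emod_of_pos hlen]
      have hr0 : 0 ≤ r := by rw [hre]; exact Int.emod_nonneg _ (by omega)
      have hrlt : r < (ls.length : Int) := by rw [hre]; exact Int.emod_lt_of_pos _ hlen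
      have hq0 : 0 ≤ q := by rw [hqe]; exact Int.ediv_nonneg (by omega) (by omega)
      have hsplit : q * (ls.length : Int) + r = limit := by
        rw [hqe, hre]; rw [Int.mul_comm]; exact Int.ediv_add_emod limit (ls.length : Int)
      have hN : limit.toNat = q.toNat * ls.length + r.toNat := by
        have h1 : ((q.toNat * ls.length + r.toNat : Nat) : Int) = limit := by
          push_cast [Int.toNat_of_nonneg hq0, Int.toNat_of_nonneg hr0]
          exact hsplit
        omega
      rw [pyLoopA_eq_cyc ls limit limit.toNat [] 0 (by simp), List.nil_append,
          cyc_eq_map ls hls limit.toNat 0 hls]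
      rw [PySem.List.slice_to ls hr0]
      rw [blocks_eq_map ls q.toNat r.toNat (by omega), ← hN]
      simp
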